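-- pv_equiv track=rewrite | github.com/arriolac/Squarelotron | squarelotron.py | restore_ring
-- ===== SOURCE A (Python) =====
-- def restore_ring(postsquarelotron, presquarelotron, ring):
--     returnSquarelotron = []
--     for row in postsquarelotron:
--         returnSquarelotron.append(list(row))
--
--     for i in range(0, len(presquarelotron)):
--         if (ring == 0):
--             if (i != 0 and i != len(presquarelotron)-1):
--                 returnSquarelotron[i][1:-1] = presquarelotron[i][1:-1]
--         else:
--             if (i == 0 or i == len(presquarelotron)-1):
--                 returnSquarelotron[i][:] = presquarelotron[i][:]
--             else:
--                 returnSquarelotron[i][0] = presquarelotron[i][0]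
--                 returnSquarelotron[i][-1] = presquarelotron[i][-1]
--     return returnSquarelotron
-- ===== SOURCE B (Python) =====
-- def restore_ring(postsquarelotron, presquarelotron, ring):
--     n = len(presquarelotron)
--
--     def restored(i, j, m):
--         if ring == 0:
--             return 0 < i < n - 1 and 0 < j < m - 1
--         return i == 0 or i == n - 1 or j == 0 or j == m - 1
--
--     return [[presquarelotron[i][j] if i < n and restored(i, j, len(row)) else v
--              for j, v in enumerate(row)]
--             for i, row in enumerate(postsquarelotron)]
-- ===== Notes on version B (the rewrite author's own statement) =====
-- stated objective: alternative
-- what changed: B rebuilds the matrix cell by cell with a nested comprehension and a ring-membership predicate (choose pre[i][j] on restored cells, the post value elsewhere), instead of A's copy-everything-then-mutate loop with slice and element assignment; Pre_ excludes the inputs where A raises IndexError and the ragged inputs where a written pre row's length differs from the matching post row's, on which A's slice/whole-row assignment changes the row's length (a length change a cell-wise rebuild cannot express).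
-- outside the precondition, e.g. on restore_ring([[], [1, 2]], [[7, 2], [1, -1]], 2): A returns [[7, 2], [1, -1]], B returns [[], [1, -1]]
import Mathlib
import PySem

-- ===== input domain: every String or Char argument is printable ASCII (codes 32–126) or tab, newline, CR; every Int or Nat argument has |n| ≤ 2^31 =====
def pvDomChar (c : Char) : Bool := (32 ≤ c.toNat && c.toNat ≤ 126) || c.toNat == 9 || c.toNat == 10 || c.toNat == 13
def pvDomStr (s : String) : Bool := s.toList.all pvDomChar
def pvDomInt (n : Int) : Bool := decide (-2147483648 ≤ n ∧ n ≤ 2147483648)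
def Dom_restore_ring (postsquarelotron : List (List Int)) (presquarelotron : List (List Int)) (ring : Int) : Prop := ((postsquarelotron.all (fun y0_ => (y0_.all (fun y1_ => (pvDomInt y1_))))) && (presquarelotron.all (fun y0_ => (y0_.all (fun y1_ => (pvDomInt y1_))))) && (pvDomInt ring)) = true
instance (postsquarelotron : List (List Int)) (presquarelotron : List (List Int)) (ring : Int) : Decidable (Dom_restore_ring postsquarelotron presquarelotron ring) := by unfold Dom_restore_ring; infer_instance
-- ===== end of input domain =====

-- B rebuilds the matrix cell by cell with a ring-membership predicate instead of A's
-- copy-then-overwrite mutation loop; objective: alternative decomposition, same cost.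

-- ===== PORT A =====
-- exact value of Python's slice assignment 'lst[1:-1] = x' (valid for every length of lst)
def pySliceAssign11 (lst x : List Int) : List Int :=
  lst.take 1 ++ x ++ lst.drop (max 1 (lst.length - 1))

def restore_ring (postsquarelotron : List (List Int)) (presquarelotron : List (List Int)) (ring : Int) : List (List Int) :=
  -- returnSquarelotron = [list(row) for row in postsquarelotron]
  let ret := postsquarelotron.map (fun row => row)
  -- for i in range(0, len(presquarelotron)): …  (reads that raise in Python are defaulted; Pre_ excludes them)
  (List.range presquarelotron.length).foldl (fun ret i =>
    if ring = 0 then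
      if i ≠ 0 ∧ i ≠ presquarelotron.length - 1 then
        ret.set i (pySliceAssign11 (ret.getD i [])
          (PySem.List.slice (presquarelotron.getD i []) (some 1) (some (-1))))
      else ret
    else
      if i = 0 ∨ i = presquarelotron.length - 1 then
        ret.set i (presquarelotron.getD i [])
      else
        -- returnSquarelotron[i][0] = pre[i][0]; returnSquarelotron[i][-1] = pre[i][-1]
        let row := (ret.getD i []).set 0 ((presquarelotron.getD i []).getD 0 0)
        ret.set i (row.set (row.length - 1)
          ((presquarelotron.getD i []).getD ((presquarelotron.getD i []).length - 1) 0))) ret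

-- ===== PORT B =====
-- restored(i, j, m): does cell (i, j) of a row of width m belong to the ring being restored?
def pvRestored (ring : Int) (n i j m : Nat) : Bool :=
  if ring = 0 then decide (0 < i ∧ i < n - 1 ∧ 0 < j ∧ j < m - 1)
  else decide (i = 0 ∨ i = n - 1 ∨ j = 0 ∨ j = m - 1)

def restore_ring_alt (postsquarelotron : List (List Int)) (presquarelotron : List (List Int)) (ring : Int) : List (List Int) :=
  -- nested comprehension: presquarelotron[i][j] on restored cells, the post value elsewhere
  -- (the read presquarelotron[i][j] raises in Python only outside Pre_; here it is defaulted)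
  let n := presquarelotron.length
  postsquarelotron.mapIdx (fun i row =>
    row.mapIdx (fun j v =>
      if i < n ∧ pvRestored ring n i j row.length = true then
        (presquarelotron.getD i []).getD j 0
      else v))

-- ===== PRECONDITION & SPEC =====
-- Pre_ excludes the inputs where A raises IndexError (a written row index beyond postsquarelotron,
-- or, with ring != 0, an empty interior row) and the ragged inputs where a written pre row's length
-- differs from the matching post row's, on which A's slice/whole-row assignment changes the row's length.
def Pre_restore_ring (postsquarelotron : List (List Int)) (presquarelotron : List (List Int)) (ring : Int) : Prop :=
  ∀ i ∈ List.range presquarelotron.length,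
    (ring = 0 → (i ≠ 0 ∧ i ≠ presquarelotron.length - 1)) →
      i < postsquarelotron.length ∧
      (presquarelotron.getD i []).length = (postsquarelotron.getD i []).length ∧
      (ring ≠ 0 → i ≠ 0 → i ≠ presquarelotron.length - 1 → presquarelotron.getD i [] ≠ [])
instance (postsquarelotron : List (List Int)) (presquarelotron : List (List Int)) (ring : Int) : Decidable (Pre_restore_ring postsquarelotron presquarelotron ring) := by unfold Pre_restore_ring; infer_instance

def pvWitness_restore_ring : List (List Int) × List (List Int) × Int :=
  ([[1, 2, 3], [4, 5, 6], [7, 8, 9]], [[10, 11, 12], [13, 14, 15], [16, 17, 18]], 1)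

def Spec_restore_ring (postsquarelotron : List (List Int)) (presquarelotron : List (List Int)) (ring : Int) (out : List (List Int)) : Prop := out = restore_ring_alt postsquarelotron presquarelotron ring
instance (postsquarelotron : List (List Int)) (presquarelotron : List (List Int)) (ring : Int) (out : List (List Int)) : Decidable (Spec_restore_ring postsquarelotron presquarelotron ring out) := by unfold Spec_restore_ring; infer_instance

-- ===== CLAIM (what is proved, stated in full; the proofs are below) =====
def Claim_equal_restore_ring : Prop := ∀ (postsquarelotron : List (List Int)) (presquarelotron : List (List Int)) (ring : Int), Dom_restore_ring postsquarelotron presquarelotron ring → Pre_restore_ring postsquarelotron presquarelotron ring → Spec_restore_ring postsquarelotron presquarelotron ring (restore_ring postsquarelotron presquarelotron ring)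

-- ===== LEMMAS AND PROOFS =====

-- proof-only abstractions of A's loop body: is row i touched, and what it becomes
def pvTouched (ring : Int) (n i : Nat) : Bool :=
  if ring = 0 then decide (i ≠ 0 ∧ i ≠ n - 1) else true

def pvRowG (presquarelotron : List (List Int)) (ring : Int) (i : Nat) (r : List Int) : List Int :=
  if ring = 0 then
    pySliceAssign11 r (PySem.List.slice (presquarelotron.getD i []) (some 1) (some (-1)))
  else if i = 0 ∨ i = presquarelotron.length - 1 then
    presquarelotron.getD i []
  else
    let row := r.set 0 ((presquarelotron.getD i []).getD 0 0)
    row.set (row.length - 1)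
      ((presquarelotron.getD i []).getD ((presquarelotron.getD i []).length - 1) 0)

def pvStep (presquarelotron : List (List Int)) (ring : Int) (ret : List (List Int)) (i : Nat) : List (List Int) :=
  if pvTouched ring presquarelotron.length i then
    ret.set i (pvRowG presquarelotron ring i (ret.getD i []))
  else ret

lemma pvStep_eq (pre : List (List Int)) (ring : Int) :
    (fun (ret : List (List Int)) (i : Nat) =>
      if ring = 0 then
        if i ≠ 0 ∧ i ≠ pre.length - 1 then
          ret.set i (pySliceAssign11 (ret.getD i [])
            (PySem.List.slice (pre.getD i []) (some 1) (some (-1))))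
        else ret
      else
        if i = 0 ∨ i = pre.length - 1 then
          ret.set i (pre.getD i [])
        else
          let row := (ret.getD i []).set 0 ((pre.getD i []).getD 0 0)
          ret.set i (row.set (row.length - 1)
            ((pre.getD i []).getD ((pre.getD i []).length - 1) 0)))
    = pvStep pre ring := by
  funext ret i
  by_cases hr : ring = 0
  · simp only [pvStep, pvTouched, pvRowG, hr]
    by_cases h : i ≠ 0 ∧ i ≠ pre.length - 1 <;> simp [h]
  · simp only [pvStep, pvTouched, pvRowG, if_neg hr]
    by_cases h : i = 0 ∨ i = pre.length - 1 <;> simp [h]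

lemma pvFold_length (pre : List (List Int)) (ring : Int) :
    ∀ (m : Nat) (l : List (List Int)),
      ((List.range m).foldl (pvStep pre ring) l).length = l.length := by
  intro m
  induction m with
  | zero => intro l; simp
  | succ m ih =>
    intro l
    rw [List.range_succ, List.foldl_append]
    simp only [List.foldl_cons, List.foldl_nil, pvStep]
    split_ifs <;> simp [ih]

lemma pvFold_getD (pre : List (List Int)) (ring : Int) :
    ∀ (m : Nat) (l : List (List Int)),
      (∀ i, i < m → pvTouched ring pre.length i = true → i < l.length) →
      ∀ j, ((List.range m).foldl (pvStep pre ring) l).getD j []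
        = if j < m ∧ pvTouched ring pre.length j = true then pvRowG pre ring j (l.getD j [])
          else l.getD j [] := by
  intro m
  induction m with
  | zero => intro l _ j; simp
  | succ m ih =>
    intro l h j
    have h' : ∀ i, i < m → pvTouched ring pre.length i = true → i < l.length := by
      intro i hi; exact h i (by omega)
    rw [List.range_succ, List.foldl_append, List.foldl_cons, List.foldl_nil]
    have hRlen : ((List.range m).foldl (pvStep pre ring) l).length = l.length :=
      pvFold_length pre ring m l
    by_cases ht : pvTouched ring pre.length m = true
    · have hm : m < l.length := h m (by omega) ht
      simp only [pvStep]
      rw [if_pos ht]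
      have hRm : ((List.range m).foldl (pvStep pre ring) l).getD m [] = l.getD m [] := by
        rw [ih l h' m]; simp
      rw [hRm]
      by_cases hj : j = m
      · subst hj
        rw [if_pos ⟨Nat.lt_succ_self j, ht⟩]
        simp [List.getD, List.getElem?_set_self (by omega : j < ((List.range j).foldl (pvStep pre ring) l).length)]
      · have hgd :
            (((List.range m).foldl (pvStep pre ring) l).set m (pvRowG pre ring m (l.getD m []))).getD j []
              = ((List.range m).foldl (pvStep pre ring) l).getD j [] := by
          simp [List.getD, List.getElem?_set_ne (fun hmj => hj hmj.symm)]
        rw [hgd, ih l h' j]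
        by_cases hjm : j < m
        · by_cases htj : pvTouched ring pre.length j = true
          · rw [if_pos ⟨hjm, htj⟩, if_pos ⟨by omega, htj⟩]
          · rw [if_neg (fun hc => htj hc.2), if_neg (fun hc => htj hc.2)]
        · rw [if_neg (fun hc => hjm hc.1), if_neg (fun hc => by omega)]
    · simp only [pvStep]
      rw [if_neg ht, ih l h' j]
      have hiff : (j < m ∧ pvTouched ring pre.length j = true)
          ↔ (j < m + 1 ∧ pvTouched ring pre.length j = true) := by
        constructor
        · rintro ⟨c, t⟩; exact ⟨by omega, t⟩
        · rintro ⟨c, t⟩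
          refine ⟨?_, t⟩
          rcases Nat.lt_succ_iff_lt_or_eq.mp c with hc | hc
          · exact hc
          · exact absurd (hc ▸ t) ht
      rw [if_congr hiff rfl rfl]

-- the middle slice p[1:-1] as drop/take
lemma pvSlice11 (p : List Int) :
    PySem.List.slice p (some 1) (some (-1)) = (p.drop 1).take (p.length - 2) := by
  have h1 : PySem.List.slice p (some (1 : Int)) (some (-1))
      = (p.drop (PySem.List.clampIdx p.length 1)).take
          (PySem.List.clampIdx p.length (-1) - PySem.List.clampIdx p.length 1) := by
    simp [PySem.List.slice]
  rw [h1, PySem.List.clampIdx_neg_one]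
  have h2 : PySem.List.clampIdx p.length 1 = min 1 p.length := by
    simp
  rw [h2]
  cases p with
  | nil => simp
  | cons a t => simp

-- a cell-wise rebuilt row whose restored set is the middle equals A's slice assignment
lemma pvRow_mid (r p : List Int) (hl : p.length = r.length)
    (C : Nat → Prop) [DecidablePred C]
    (hc : ∀ k, k < r.length → (C k ↔ (0 < k ∧ k < r.length - 1))) :
    r.mapIdx (fun k v => if C k then p.getD k 0 else v)
      = pySliceAssign11 r (PySem.List.slice p (some 1) (some (-1))) := by
  rw [pvSlice11]
  have hml : ((p.drop 1).take (p.length - 2)).length = r.length - 2 := by simp; omega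
  apply List.ext_getElem
  · simp [pySliceAssign11]; omega
  · intro k hk1 hk2
    have hk : k < r.length := by simpa using hk1
    have hL : ((r.take 1) ++ (p.drop 1).take (p.length - 2)).length = min 1 r.length + (r.length - 2) := by
      simp only [List.length_append, List.length_take, List.length_drop]; omega
    simp only [List.getElem_mapIdx, pySliceAssign11]
    rw [if_congr (hc k hk) rfl rfl]
    by_cases hc1 : k < min 1 r.length + (r.length - 2)
    · rw [List.getElem_append_left (by rw [hL]; exact hc1)]
      by_cases hk0 : k = 0
      · subst hk0
        rw [List.getElem_append_left (by simp; omega), List.getElem_take,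
          if_neg (by omega)]
      · rw [List.getElem_append_right (by simp; omega), List.getElem_take, List.getElem_drop,
          if_pos (by omega)]
        have hkk : k < p.length := by omega
        simp only [List.getD, List.getElem?_eq_getElem hkk, Option.getD_some]
        congr 1
        simp
        omega
    · rw [List.getElem_append_right (by rw [hL]; omega), List.getElem_drop]
      simp only [hL]
      rw [if_neg (by omega)]
      congr 1
      omega

-- a cell-wise rebuilt row whose restored set is everything equals the pre row
lemma pvRow_all (r p : List Int) (hl : p.length = r.length)
    (C : Nat → Prop) [DecidablePred C]
    (hc : ∀ k, k < r.length → C k) :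
    r.mapIdx (fun k v => if C k then p.getD k 0 else v) = p := by
  apply List.ext_getElem (by simp [hl])
  intro k hk1 hk2
  have hk : k < r.length := by simpa using hk1
  simp only [List.getElem_mapIdx]
  rw [if_pos (hc k hk)]
  simp [List.getD, List.getElem?_eq_getElem hk2]

-- a cell-wise rebuilt row whose restored set is the two ends equals A's two assignments
lemma pvRow_ends (r p : List Int) (hl : p.length = r.length)
    (C : Nat → Prop) [DecidablePred C]
    (hc : ∀ k, k < r.length → (C k ↔ (k = 0 ∨ k = r.length - 1))) :
    r.mapIdx (fun k v => if C k then p.getD k 0 else v)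
      = (r.set 0 (p.getD 0 0)).set ((r.set 0 (p.getD 0 0)).length - 1)
          (p.getD (p.length - 1) 0) := by
  apply List.ext_getElem (by simp)
  intro k hk1 hk2
  have hk : k < r.length := by simpa using hk1
  simp only [List.getElem_mapIdx, List.getElem_set, List.length_set]
  rw [if_congr (hc k hk) rfl rfl]
  split_ifs with h1 h2 h3 <;>
    first
      | rfl
      | (congr 1; omega)

-- a cell-wise rebuilt row with an empty restored set is unchanged
lemma pvRow_id (r : List Int) (f : Nat → Int)
    (C : Nat → Prop) [DecidablePred C]
    (hc : ∀ k, k < r.length → ¬ C k) :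
    r.mapIdx (fun k v => if C k then f k else v) = r := by
  apply List.ext_getElem (by simp)
  intro k hk1 hk2
  have hk : k < r.length := by simpa using hk1
  simp only [List.getElem_mapIdx]
  rw [if_neg (hc k hk)]

-- B's row j agrees with pvTouched/pvRowG on inputs admitted by Pre_
lemma pvAlt_getD (post pre : List (List Int)) (ring : Int)
    (hpre : Pre_restore_ring post pre ring) (j : Nat) (hj : j < post.length) :
    (restore_ring_alt post pre ring).getD j []
      = if j < pre.length ∧ pvTouched ring pre.length j = true then
          pvRowG pre ring j (post.getD j [])
        else post.getD j [] := by
  have hpj : post.getD j [] = post[j] := by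
    simp [List.getD, List.getElem?_eq_getElem hj]
  have hmap : (restore_ring_alt post pre ring).getD j []
      = (post[j]).mapIdx (fun k v =>
          if j < pre.length ∧ pvRestored ring pre.length j k (post[j]).length = true then
            (pre.getD j []).getD k 0
          else v) := by
    simp [restore_ring_alt, List.getD, List.getElem?_mapIdx, List.getElem?_eq_getElem hj]
  rw [hmap, hpj]
  by_cases hr0 : ring = 0
  · by_cases hin : j < pre.length ∧ (j ≠ 0 ∧ j ≠ pre.length - 1)
    · -- interior row, ring = 0: the middle cells are restored
      rcases hin with ⟨h1, h2, h3⟩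
      obtain ⟨-, hlen, -⟩ := hpre j (List.mem_range.mpr h1) (fun _ => ⟨h2, h3⟩)
      rw [hpj] at hlen
      rw [if_pos ⟨h1, by simp [pvTouched, hr0, h2, h3]⟩]
      simp only [pvRowG, if_pos hr0]
      exact pvRow_mid (post[j]) (pre.getD j []) hlen _
        (fun k hk => by simp [pvRestored, hr0, h1]; omega)
    · -- border row or j beyond pre: no cell is restored
      have hnt : ¬ (j < pre.length ∧ pvTouched ring pre.length j = true) := by
        rintro ⟨g1, g2⟩
        simp [pvTouched, hr0] at g2
        exact hin ⟨g1, g2⟩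
      rw [if_neg hnt]
      exact pvRow_id (post[j]) _ _
        (fun k hk => by
          rintro ⟨g1, g2⟩
          simp [pvRestored, hr0] at g2
          exact hin ⟨g1, by omega⟩)
  · by_cases h1 : j < pre.length
    · obtain ⟨-, hlen, hne⟩ := hpre j (List.mem_range.mpr h1) (fun hc => absurd hc hr0)
      rw [hpj] at hlen
      rw [if_pos ⟨h1, by simp [pvTouched, hr0]⟩]
      by_cases hb : j = 0 ∨ j = pre.length - 1
      · -- border row, ring ≠ 0: every cell is restored
        simp only [pvRowG, if_neg hr0, if_pos hb]
        exact pvRow_all (post[j]) (pre.getD j []) hlen _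
          (fun k hk => ⟨h1, by simp [pvRestored, hr0]; tauto⟩)
      · -- interior row, ring ≠ 0: the two end cells are restored
        have hb' : j ≠ 0 ∧ j ≠ pre.length - 1 := by tauto
        have hpne : pre.getD j [] ≠ [] := hne hr0 hb'.1 hb'.2
        have hm : 0 < (post[j]).length := by
          have := List.length_pos_of_ne_nil hpne
          omega
        simp only [pvRowG, if_neg hr0, if_neg hb]
        exact pvRow_ends (post[j]) (pre.getD j []) hlen _
          (fun k hk => by
            constructor
            · rintro ⟨-, g⟩
              simp [pvRestored, hr0] at g
              omega
            · intro g
              exact ⟨h1, by simp [pvRestored, hr0]; omega⟩)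
    · rw [if_neg (fun hc => by omega)]
      exact pvRow_id (post[j]) _ _ (fun k hk => by rintro ⟨g, -⟩; omega)

-- ===== VERDICT (by name: the statement is the Claim_ definition above) =====
theorem restore_ring_spec : Claim_equal_restore_ring := by
  intro post pre ring _ hpre
  unfold Spec_restore_ring
  have hA : restore_ring post pre ring = (List.range pre.length).foldl (pvStep pre ring) post := by
    simp only [restore_ring]
    rw [List.map_id', pvStep_eq]
  have htouch : ∀ i, i < pre.length → pvTouched ring pre.length i = true → i < post.length := by
    intro i hi ht
    by_cases hr : ring = 0
    · simp [pvTouched, hr] at ht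
      exact (hpre i (List.mem_range.mpr hi) (fun _ => ht)).1
    · exact (hpre i (List.mem_range.mpr hi) (fun hc => absurd hc hr)).1
  have hlenA : (restore_ring post pre ring).length = post.length := by
    rw [hA]; exact pvFold_length pre ring pre.length post
  have hlenB : (restore_ring_alt post pre ring).length = post.length := by
    simp [restore_ring_alt]
  apply List.ext_getElem (by omega)
  intro j hj1 hj2
  have e1 : (restore_ring post pre ring)[j] = (restore_ring post pre ring).getD j [] := by
    simp [List.getD, List.getElem?_eq_getElem hj1]
  have e2 : (restore_ring_alt post pre ring)[j] = (restore_ring_alt post pre ring).getD j [] := by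
    simp [List.getD, List.getElem?_eq_getElem hj2]
  rw [e1, e2, hA, pvFold_getD pre ring pre.length post htouch j,
    pvAlt_getD post pre ring hpre j (by omega)]
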